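-- pv_equiv track=rewrite | github.com/agbajames/agbajames-financial-qa-pipeline | src/prompt_and_schema.py | _choose_quote_span
-- ===== SOURCE A (Python) =====
-- from typing import Any, Dict, List, Optional, Tuple
--
-- def _find_all_occurrences(text: str, needle: str) -> List[int]:
--     """Find all non-overlapping start positions of a substring."""
--     if needle == "":
--         return []
--
--     positions: List[int] = []
--     search_from = 0
--
--     while True:
--         idx = text.find(needle, search_from)
--         if idx < 0:
--             return positions
--         positions.append(idx)
--         search_from = idx + len(needle)
--
-- def _choose_quote_span(
--     context: str,
--     quote: str,
--     used_spans: set[Tuple[int, int]],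
--     search_from: int,
-- ) -> Tuple[Optional[int], Optional[int]]:
--     """
--     Choose a quote span, preferring an unused occurrence at or after
--     search_from, then falling back to the first unused occurrence.
--     """
--     if quote == "":
--         return None, None
--
--     candidates = _find_all_occurrences(context, quote)
--     if not candidates:
--         return None, None
--
--     span_length = len(quote)
--
--     for start in candidates:
--         end = start + span_length
--         if start >= search_from and (start, end) not in used_spans:
--             return start, end
--
--     for start in candidates:
--         end = start + span_length
--         if (start, end) not in used_spans:
--             return start, end
--
--     return None, None
-- ===== SOURCE B (Python) =====
-- from typing import Optional, Tuple
--
--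
-- def _choose_quote_span(
--     context: str,
--     quote: str,
--     used_spans: set[Tuple[int, int]],
--     search_from: int,
-- ) -> Tuple[Optional[int], Optional[int]]:
--     """Single pass over occurrences: return the first unused one at or
--     after search_from immediately; remember the first unused one seen
--     anywhere as a fallback and return it only after the scan ends."""
--     if quote == "":
--         return None, None
--
--     n = len(quote)
--     fallback: Optional[Tuple[int, int]] = None
--     pos = 0
--     while True:
--         start = context.find(quote, pos)
--         if start < 0:
--             break
--         end = start + n
--         if (start, end) not in used_spans:
--             if start >= search_from:
--                 return start, end
--             if fallback is None:
--                 fallback = (start, end)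
--         pos = end
--
--     if fallback is not None:
--         return fallback
--     return None, None
-- ===== Notes on version B (the rewrite author's own statement) =====
-- stated objective: alternative
-- what changed: Replaced the build-a-candidate-list-then-two-scans structure by a single pass that drives str.find directly, returning immediately on an unused occurrence at/after search_from and keeping one fallback variable for the first unused occurrence seen.
import Mathlib
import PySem

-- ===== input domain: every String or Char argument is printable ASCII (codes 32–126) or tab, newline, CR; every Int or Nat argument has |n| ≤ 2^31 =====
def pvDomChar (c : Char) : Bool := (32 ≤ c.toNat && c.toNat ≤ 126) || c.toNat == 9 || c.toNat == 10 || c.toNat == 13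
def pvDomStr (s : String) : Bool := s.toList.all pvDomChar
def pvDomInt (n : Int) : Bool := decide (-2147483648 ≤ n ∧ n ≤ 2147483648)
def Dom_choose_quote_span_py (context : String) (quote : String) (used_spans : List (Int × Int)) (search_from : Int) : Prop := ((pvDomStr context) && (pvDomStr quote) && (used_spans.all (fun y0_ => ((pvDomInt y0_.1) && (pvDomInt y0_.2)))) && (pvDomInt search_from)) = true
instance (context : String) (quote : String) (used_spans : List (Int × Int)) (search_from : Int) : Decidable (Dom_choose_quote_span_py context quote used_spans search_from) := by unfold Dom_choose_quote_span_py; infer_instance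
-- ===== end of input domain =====

-- B is an 'alternative' decomposition: one pass driving str.find with a fallback
-- accumulator, instead of A's candidate-list build followed by two scans.
-- (The fuel bound text.length + 1 in both loop ports is never exhausted: each
-- iteration advances the search position by len(needle) ≥ 1.)

-- ===== PORT A =====
-- the while-loop of _find_all_occurrences
def pvFindAllGo (text needle : List Char) (fuel : Nat) (searchFrom : Int) (positions : List Int) : List Int :=
  match fuel with
  | 0 => positions
  | fuel + 1 =>
    let idx := PySem.Chars.findFrom text needle searchFrom none
    if idx < 0 then positions
    else pvFindAllGo text needle fuel (idx + (needle.length : Int)) (positions ++ [idx])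

def pvFindAllOccurrences (text needle : List Char) : List Int :=
  if needle = [] then []
  else pvFindAllGo text needle (text.length + 1) 0 []

def choose_quote_span_py (context : String) (quote : String) (used_spans : List (Int × Int)) (search_from : Int) : Option Int × Option Int :=
  if quote = "" then (none, none)
  else
    let candidates := pvFindAllOccurrences context.toList quote.toList
    if candidates = [] then (none, none)
    else
      let spanLength : Int := quote.toList.length
      match candidates.find? (fun start => decide (start ≥ search_from) && !used_spans.contains (start, start + spanLength)) with
      | some start => (some start, some (start + spanLength))
      | none =>
        match candidates.find? (fun start => !used_spans.contains (start, start + spanLength)) with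
        | some start => (some start, some (start + spanLength))
        | none => (none, none)

-- ===== PORT B =====
-- the single while-loop of B: find, decide, remember fallback
def pvAltGo (context quote : List Char) (used_spans : List (Int × Int)) (search_from : Int) (n : Int) (fuel : Nat) (pos : Int) (fallback : Option (Int × Int)) : Option Int × Option Int :=
  match fuel with
  | 0 =>
    match fallback with
    | some fb => (some fb.1, some fb.2)
    | none => (none, none)
  | fuel + 1 =>
    let start := PySem.Chars.findFrom context quote pos none
    if start < 0 then
      match fallback with
      | some fb => (some fb.1, some fb.2)
      | none => (none, none)
    else
      let e := start + n
      if !used_spans.contains (start, e) then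
        if start ≥ search_from then (some start, some e)
        else
          match fallback with
          | some _ => pvAltGo context quote used_spans search_from n fuel e fallback
          | none => pvAltGo context quote used_spans search_from n fuel e (some (start, e))
      else pvAltGo context quote used_spans search_from n fuel e fallback

def choose_quote_span_py_alt (context : String) (quote : String) (used_spans : List (Int × Int)) (search_from : Int) : Option Int × Option Int :=
  if quote = "" then (none, none)
  else
    pvAltGo context.toList quote.toList used_spans search_from (quote.toList.length : Int) (context.toList.length + 1) 0 none

-- ===== PRECONDITION & SPEC =====
def Spec_choose_quote_span_py (context : String) (quote : String) (used_spans : List (Int × Int)) (search_from : Int) (out : Option Int × Option Int) : Prop := out = choose_quote_span_py_alt context quote used_spans search_from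
instance (context : String) (quote : String) (used_spans : List (Int × Int)) (search_from : Int) (out : Option Int × Option Int) : Decidable (Spec_choose_quote_span_py context quote used_spans search_from out) := by unfold Spec_choose_quote_span_py; infer_instance

-- ===== CLAIM (what is proved, stated in full; the proofs are below) =====
def Claim_equal_choose_quote_span_py : Prop := ∀ (context : String) (quote : String) (used_spans : List (Int × Int)) (search_from : Int), Dom_choose_quote_span_py context quote used_spans search_from → Spec_choose_quote_span_py context quote used_spans search_from (choose_quote_span_py context quote used_spans search_from)

-- ===== LEMMAS AND PROOFS =====

theorem pvFindAllGo_acc (text needle : List Char) (fuel : Nat) :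
    ∀ (searchFrom : Int) (acc : List Int),
      pvFindAllGo text needle fuel searchFrom acc = acc ++ pvFindAllGo text needle fuel searchFrom [] := by
  induction fuel with
  | zero => intro s acc; simp [pvFindAllGo]
  | succ f ih =>
    intro s acc
    simp only [pvFindAllGo]
    split
    · simp
    · rw [ih _ (acc ++ _), ih _ ([] ++ _)]
      simp

-- the A-shaped result computed from the candidate list gathered from position `pos`,
-- with the fallback accumulator resolved after a failed ≥-search
def pvAResolve (used_spans : List (Int × Int)) (search_from : Int) (n : Int)
    (cands : List Int) (fallback : Option (Int × Int)) : Option Int × Option Int :=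
  match cands.find? (fun s => decide (s ≥ search_from) && !used_spans.contains (s, s + n)) with
  | some s => (some s, some (s + n))
  | none =>
    match fallback with
    | some fb => (some fb.1, some fb.2)
    | none =>
      match cands.find? (fun s => !used_spans.contains (s, s + n)) with
      | some s => (some s, some (s + n))
      | none => (none, none)

-- one cons-step of pvAResolve, per case of the head candidate
theorem pvAResolve_cons_hit (us : List (Int × Int)) (sf n s : Int) (rest : List Int) (fb : Option (Int × Int))
    (hge : sf ≤ s) (hmem : (s, s + n) ∉ us) :
    pvAResolve us sf n (s :: rest) fb = (some s, some (s + n)) := by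
  unfold pvAResolve
  rw [List.find?_cons_of_pos (p := fun t => decide (t ≥ sf) && !us.contains (t, t + n))
    (by simp [hge, hmem])]

theorem pvAResolve_cons_used (us : List (Int × Int)) (sf n s : Int) (rest : List Int) (fb : Option (Int × Int))
    (hmem : (s, s + n) ∈ us) :
    pvAResolve us sf n (s :: rest) fb = pvAResolve us sf n rest fb := by
  unfold pvAResolve
  rw [List.find?_cons_of_neg (p := fun t => decide (t ≥ sf) && !us.contains (t, t + n))
      (by simp [hmem]),
    List.find?_cons_of_neg (p := fun t => !us.contains (t, t + n)) (by simp [hmem])]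

theorem pvAResolve_cons_skip_some (us : List (Int × Int)) (sf n s : Int) (rest : List Int) (fb0 : Int × Int)
    (hge : ¬ sf ≤ s) :
    pvAResolve us sf n (s :: rest) (some fb0) = pvAResolve us sf n rest (some fb0) := by
  unfold pvAResolve
  rw [List.find?_cons_of_neg (p := fun t => decide (t ≥ sf) && !us.contains (t, t + n))
    (by simp [hge])]

theorem pvAResolve_cons_skip_none (us : List (Int × Int)) (sf n s : Int) (rest : List Int)
    (hge : ¬ sf ≤ s) (hmem : (s, s + n) ∉ us) :
    pvAResolve us sf n (s :: rest) none = pvAResolve us sf n rest (some (s, s + n)) := by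
  unfold pvAResolve
  rw [List.find?_cons_of_neg (p := fun t => decide (t ≥ sf) && !us.contains (t, t + n))
      (by simp [hge]),
    List.find?_cons_of_pos (p := fun t => !us.contains (t, t + n)) (by simp [hmem])]

theorem pvAltGo_eq (context quote : List Char) (used_spans : List (Int × Int)) (search_from : Int) (fuel : Nat) :
    ∀ (pos : Int) (fallback : Option (Int × Int)),
      pvAltGo context quote used_spans search_from (quote.length : Int) fuel pos fallback =
        pvAResolve used_spans search_from (quote.length : Int) (pvFindAllGo context quote fuel pos []) fallback := by
  induction fuel with
  | zero => intro pos fb; cases fb <;> simp [pvAltGo, pvFindAllGo, pvAResolve]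
  | succ f ih =>
    intro pos fb
    simp only [pvAltGo, pvFindAllGo]
    by_cases hneg : PySem.Chars.findFrom context quote pos none < 0
    · simp only [hneg, if_true]
      cases fb <;> simp [pvAResolve, List.find?]
    · simp only [hneg, if_false]
      rw [pvFindAllGo_acc, List.nil_append, List.singleton_append]
      set s := PySem.Chars.findFrom context quote pos none with hs
      by_cases hmem : (s, s + (quote.length : Int)) ∈ used_spans
      · -- head occurrence already used: both sides skip it
        rw [if_neg (by simpa using hmem), ih, pvAResolve_cons_used _ _ _ _ _ _ hmem]
      · by_cases hge : s ≥ search_from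
        · -- unused and at/after search_from: B returns it; it heads A's first scan
          rw [if_pos (by simpa using hmem), if_pos hge,
            pvAResolve_cons_hit _ _ _ _ _ _ hge hmem]
        · rw [if_pos (by simpa using hmem), if_neg hge]
          cases fb with
          | some fb0 =>
            simp only [ih]
            rw [pvAResolve_cons_skip_some _ _ _ _ _ fb0 hge]
          | none =>
            simp only [ih]
            rw [pvAResolve_cons_skip_none _ _ _ _ _ hge hmem]

-- ===== VERDICT (by name: the statement is the Claim_ definition above) =====
theorem choose_quote_span_py_spec : Claim_equal_choose_quote_span_py := by
  intro context quote used_spans search_from _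
  unfold Spec_choose_quote_span_py choose_quote_span_py choose_quote_span_py_alt
  by_cases hq : quote = ""
  · simp [hq]
  · have hq' : quote.toList ≠ [] := by
      intro h
      exact hq (by cases quote with | _ l => simpa using congrArg String.ofList h)
    simp only [hq, if_false]
    rw [pvAltGo_eq]
    unfold pvFindAllOccurrences
    rw [if_neg hq']
    by_cases hc : pvFindAllGo context.toList quote.toList (context.toList.length + 1) 0 [] = []
    · rw [if_pos hc, hc]; rfl
    · rw [if_neg hc]; rfl
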